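-- pv_equiv track=rewrite | github.com/miliar/Code_Jam_Webscraper | solutions_python/Problem_116/1986.py | parse
-- ===== SOURCE A (Python) =====
-- def parse(text, times): # converts input text into lists of boards
--     i = 0
--     list_boards = []
--     for _ in range(times):
--         list_boards.append([])
--     for j in text:
--         if j == '.' or j == 'T' or j == 'O' or j == 'X':
--             list_boards[i].append(j)
--             if len(list_boards[i]) == 16:
--                 i += 1
--     return list_boards
-- ===== SOURCE B (Python) =====
-- def parse(text, times):  # converts input text into lists of boards
--     valid = [c for c in text if c in '.TOX']
--     boards = [[] for _ in range(times)]
--     for m in range((len(valid) + 15) // 16):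
--         boards[m].extend(valid[16 * m: 16 * m + 16])
--     return boards
-- ===== Notes on version B (the rewrite author's own statement) =====
-- stated objective: simpler
-- what changed: Replaces the stateful per-character loop (running board index, append, length-16 check) with a single filter pass followed by one chunk-copy per board; like A, B raises IndexError when the board characters exceed 16*times.
import Mathlib
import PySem

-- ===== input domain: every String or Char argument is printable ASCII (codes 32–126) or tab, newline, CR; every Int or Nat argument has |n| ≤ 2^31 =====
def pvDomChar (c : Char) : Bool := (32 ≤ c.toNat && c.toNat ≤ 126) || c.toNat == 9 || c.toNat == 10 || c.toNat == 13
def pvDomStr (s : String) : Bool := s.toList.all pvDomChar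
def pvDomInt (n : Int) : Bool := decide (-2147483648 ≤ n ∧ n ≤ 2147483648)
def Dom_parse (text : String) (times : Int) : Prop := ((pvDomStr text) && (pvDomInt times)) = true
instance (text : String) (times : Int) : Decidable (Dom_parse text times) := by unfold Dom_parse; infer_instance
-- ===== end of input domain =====

-- B replaces A's stateful per-character loop by a filter pass plus one chunk-copy per board (objective: simpler).

-- ===== PORT A =====
-- A: make `times` empty boards, then walk the text appending each '.TOX' char to board i,
-- bumping i whenever board i reaches 16 entries.  list_boards[i].append(j) is ported as
-- List.set at index i (the out-of-range case, where Python raises IndexError, is excluded by Pre_parse).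
def parse (text : String) (times : Int) : List (List String) :=
  let list_boards : List (List String) :=
    (PySem.List.pyRange 0 times 1).foldl (fun acc _ => acc ++ [[]]) []
  let st := text.toList.foldl
    (fun (st : Nat × List (List String)) (j : Char) =>
      if j == '.' || j == 'T' || j == 'O' || j == 'X' then
        let boards := st.2.set st.1 ((st.2.getD st.1 []) ++ [String.ofList [j]])
        if (boards.getD st.1 []).length == 16 then (st.1 + 1, boards) else (st.1, boards)
      else st)
    (0, list_boards)
  st.2

-- ===== PORT B =====
-- B: one filter pass collecting the board characters, then a loop over the chunk indices
-- extending board m by slice valid[16m:16m+16].  boards[m].extend(...) is ported as List.set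
-- at index m (the out-of-range case, where Python raises IndexError, is excluded by Pre_parse).
def parse_alt (text : String) (times : Int) : List (List String) :=
  let valid : List String :=
    (text.toList.filter (fun c => c == '.' || c == 'T' || c == 'O' || c == 'X')).map
      (fun c => String.ofList [c])
  let boards : List (List String) :=
    (PySem.List.pyRange 0 times 1).foldl (fun acc _ => acc ++ [[]]) []
  (PySem.List.pyRange 0 (PySem.Int.floordiv ((valid.length : Int) + 15) 16) 1).foldl
    (fun (boards : List (List String)) (m : Int) =>
      boards.set m.toNat
        ((boards.getD m.toNat []) ++ PySem.List.slice valid (some (16 * m)) (some (16 * m + 16))))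
    boards

-- ===== PRECONDITION & SPEC =====
-- Pre_ excludes exactly the inputs where both Pythons raise IndexError: more '.TOX' chars
-- than fit in the `times` boards of 16.
def Pre_parse (text : String) (times : Int) : Prop :=
  ((text.toList.countP (fun c => c == '.' || c == 'T' || c == 'O' || c == 'X') : Int) ≤ 16 * max times 0)
instance (text : String) (times : Int) : Decidable (Pre_parse text times) := by
  unfold Pre_parse; infer_instance
def pvWitness_parse : String × Int := ("T.OX ab", 1)

def Spec_parse (text : String) (times : Int) (out : List (List String)) : Prop := out = parse_alt text times
instance (text : String) (times : Int) (out : List (List String)) : Decidable (Spec_parse text times out) := by unfold Spec_parse; infer_instance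

-- ===== CLAIM (what is proved, stated in full; the proofs are below) =====
def Claim_equal_parse : Prop := ∀ (text : String) (times : Int), Dom_parse text times → Pre_parse text times → Spec_parse text times (parse text times)

-- ===== LEMMAS AND PROOFS =====

-- the board predicate and the step of A's char loop
def pvP (c : Char) : Bool := c == '.' || c == 'T' || c == 'O' || c == 'X'

def pvStep (st : Nat × List (List String)) (s : String) : Nat × List (List String) :=
  let boards := st.2.set st.1 ((st.2.getD st.1 []) ++ [s])
  if (boards.getD st.1 []).length == 16 then (st.1 + 1, boards) else (st.1, boards)

-- boards described by the processed prefix w: board n holds w[16n:16n+16]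
def pvMk (t : Nat) (w : List String) : List (List String) :=
  (List.range t).map (fun n => (w.drop (16 * n)).take 16)

-- boards after the first m chunks of w have been copied in
def pvMk2 (t : Nat) (w : List String) (m : Nat) : List (List String) :=
  (List.range t).map (fun n => if n < m then (w.drop (16 * n)).take 16 else [])

theorem pvFoldAppend {α : Type} (x : α) : ∀ (l : List Int) (acc : List α),
    l.foldl (fun a _ => a ++ [x]) acc = acc ++ List.replicate l.length x := by
  intro l; induction l with
  | nil => simp
  | cons h t ih =>
    intro acc
    rw [List.foldl_cons, ih, List.length_cons, List.append_assoc, List.singleton_append,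
      ← List.replicate_succ]

theorem pvMk_nil (t : Nat) : pvMk t [] = List.replicate t [] := by
  simp [pvMk, List.map_const']

theorem pvMk2_zero (t : Nat) (w : List String) : pvMk2 t w 0 = List.replicate t [] := by
  simp [pvMk2, List.map_const']

theorem pvMk_getD (t : Nat) (w : List String) (i : Nat) (hi : i < t) :
    (pvMk t w).getD i [] = (w.drop (16 * i)).take 16 := by
  simp [pvMk, List.getD_eq_getElem?_getD, hi]

theorem pvMk_set (t : Nat) (w : List String) (s : String) (i : Nat) (hi : i < t)
    (h1 : 16 * i ≤ w.length) (h2 : w.length < 16 * i + 16) :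
    (pvMk t w).set i ((w.drop (16 * i)).take 16 ++ [s]) = pvMk t (w ++ [s]) := by
  apply List.ext_getElem
  · simp [pvMk]
  · intro n hn hn'
    simp only [pvMk, List.length_map, List.length_range] at hn'
    rw [List.getElem_set]
    simp only [pvMk, List.getElem_map, List.getElem_range]
    split
    · next he =>
      subst he
      have hlen : (w.drop (16 * i)).length ≤ 15 := by
        simp; omega
      rw [List.take_of_length_le (by omega), List.drop_append_of_le_length h1,
        List.take_of_length_le (by simp; omega)]
    · next hne =>
      rcases Nat.lt_or_ge n i with hlt | hge
      · have hd : 16 * n ≤ w.length := by omega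
        rw [List.drop_append_of_le_length hd, List.take_append]
        have h4 : 16 - (w.drop (16 * n)).length = 0 := by simp; omega
        rw [h4]
        simp
      · have hi' : i < n := by omega
        have h3 : w.length ≤ 16 * n := by omega
        rw [List.drop_eq_nil_of_le h3, List.drop_eq_nil_of_le (by simp; omega)]

theorem pvFold_chunks (t : Nat) : ∀ (v w : List String), w.length + v.length ≤ 16 * t →
    v.foldl pvStep (w.length / 16, pvMk t w) = ((w ++ v).length / 16, pvMk t (w ++ v)) := by
  intro v
  induction v with
  | nil => intro w _; simp
  | cons s v ih =>
    intro w hle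
    have hle' : w.length + (v.length + 1) ≤ 16 * t := by simpa using hle
    have hiw : w.length / 16 < t := by omega
    have h1 : 16 * (w.length / 16) ≤ w.length := by omega
    have h2 : w.length < 16 * (w.length / 16) + 16 := by omega
    rw [List.foldl_cons]
    have hboard : (pvMk t w).getD (w.length / 16) [] = (w.drop (16 * (w.length / 16))).take 16 :=
      pvMk_getD t w _ hiw
    have hset : (pvMk t w).set (w.length / 16) ((w.drop (16 * (w.length / 16))).take 16 ++ [s])
        = pvMk t (w ++ [s]) := pvMk_set t w s _ hiw h1 h2
    have hlen : ((pvMk t (w ++ [s])).getD (w.length / 16) []).length = w.length - 16 * (w.length / 16) + 1 := by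
      rw [pvMk_getD t (w ++ [s]) _ hiw, List.drop_append_of_le_length h1]
      rw [List.take_of_length_le (by simp; omega)]
      simp
    have hstep : pvStep (w.length / 16, pvMk t w) s = ((w ++ [s]).length / 16, pvMk t (w ++ [s])) := by
      unfold pvStep
      simp only [hboard, hset, hlen]
      split
      · next heq =>
        simp only [beq_iff_eq] at heq
        have : (w ++ [s]).length / 16 = w.length / 16 + 1 := by
          simp only [List.length_append, List.length_cons, List.length_nil]
          omega
        rw [this]
      · next hne =>
        simp only [beq_iff_eq] at hne
        have : (w ++ [s]).length / 16 = w.length / 16 := by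
          simp only [List.length_append, List.length_cons, List.length_nil]
          omega
        rw [this]
    rw [hstep]
    have := ih (w ++ [s]) (by simp at hle ⊢; omega)
    rw [this, List.append_assoc]
    simp

-- A's char loop over the whole text equals the fold of pvStep over the filtered, string-mapped list
theorem pvParse_eq_fold (text : String) (times : Int) :
    parse text times =
      (((text.toList.filter pvP).map (fun c => String.ofList [c])).foldl pvStep
        (0, List.replicate times.toNat ([] : List String))).2 := by
  unfold parse
  rw [pvFoldAppend, List.nil_append, PySem.List.length_pyRange_one]
  simp only [Int.sub_zero]
  rw [List.foldl_map, List.foldl_filter]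
  rfl

-- the step of B's chunk loop
def pvGStep (w : List String) (boards : List (List String)) (k : Nat) : List (List String) :=
  boards.set k ((boards.getD k []) ++ (w.drop (16 * k)).take 16)

theorem pvMk2_step (t : Nat) (w : List String) (a : Nat) (ha : a < t) :
    pvGStep w (pvMk2 t w a) a = pvMk2 t w (a + 1) := by
  have hg : (pvMk2 t w a).getD a [] = [] := by
    simp [pvMk2, List.getD_eq_getElem?_getD, ha]
  unfold pvGStep
  rw [hg, List.nil_append]
  apply List.ext_getElem
  · simp [pvMk2]
  · intro n hn hn'
    simp only [pvMk2, List.length_map, List.length_range] at hn'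
    rw [List.getElem_set]
    simp only [pvMk2, List.getElem_map, List.getElem_range]
    split
    · next he => subst he; simp
    · next hne =>
      rcases Nat.lt_or_ge n a with hlt | hge
      · rw [if_pos hlt, if_pos (show n < a + 1 by omega)]
      · have : ¬ n < a := by omega
        have : ¬ n < a + 1 := by omega
        simp [*]

theorem pvAlt_chunk_fold (t : Nat) (w : List String) : ∀ (b a : Nat), a + b ≤ t →
    (List.range' a b).foldl (pvGStep w) (pvMk2 t w a) = pvMk2 t w (a + b) := by
  intro b
  induction b with
  | zero => intro a _; simp
  | succ b ih =>
    intro a hle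
    rw [List.range'_succ, List.foldl_cons, pvMk2_step t w a (by omega)]
    have := ih (a + 1) (by omega)
    rw [this]
    ring_nf

theorem pvMk2_full (t : Nat) (w : List String) :
    pvMk2 t w ((w.length + 15) / 16) = pvMk t w := by
  unfold pvMk2 pvMk
  apply List.map_congr_left
  intro n hn
  split
  · rfl
  · next hge =>
    have : w.length ≤ 16 * n := by omega
    rw [List.drop_eq_nil_of_le this]
    simp

-- B equals the chunk description pvMk under the precondition
theorem pvAlt_eq_mk (text : String) (times : Int)
    (h : (((text.toList.filter pvP).map (fun c => String.ofList [c])).length : Int) ≤ 16 * max times 0) :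
    parse_alt text times = pvMk times.toNat ((text.toList.filter pvP).map (fun c => String.ofList [c])) := by
  unfold parse_alt
  rw [pvFoldAppend, List.nil_append, PySem.List.length_pyRange_one]
  simp only [Int.sub_zero]
  rw [show (fun c : Char => c == '.' || c == 'T' || c == 'O' || c == 'X') = pvP from rfl]
  set w := (text.toList.filter pvP).map (fun c => String.ofList [c]) with hw
  have hL : ((w.length : Int) + 15) = (((w.length + 15 : Nat)) : Int) := by push_cast; ring
  rw [hL]
  have hfd : PySem.Int.floordiv ((w.length + 15 : Nat) : Int) 16
      = (((w.length + 15) / 16 : Nat) : Int) := by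
    exact_mod_cast PySem.Int.floordiv_natCast (w.length + 15) 16
  rw [hfd, PySem.List.pyRange_one]
  simp only [Int.sub_zero, Int.toNat_natCast]
  rw [List.foldl_map]
  have hstep : ∀ (boards : List (List String)) (k : Nat),
      boards.set ((0 + (k : Int)).toNat)
        ((boards.getD ((0 + (k : Int)).toNat) []) ++
          PySem.List.slice w (some (16 * (0 + (k : Int)))) (some (16 * (0 + (k : Int)) + 16)))
      = pvGStep w boards k := by
    intro boards k
    have h0 : (0 : Int) + (k : Int) = ((k : Nat) : Int) := by push_cast; ring
    rw [h0, Int.toNat_natCast]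
    have h16 : (16 : Int) * ((k : Nat) : Int) = ((16 * k : Nat) : Int) := by push_cast; ring
    rw [h16]
    have h16' : ((16 * k : Nat) : Int) + 16 = ((16 * k : Nat) : Int) + ((16 : Nat) : Int) := by norm_num
    rw [h16', PySem.List.slice_natCast_add]
    rfl
  have hfoldeq : (List.range ((w.length + 15) / 16)).foldl
      (fun (boards : List (List String)) (k : Nat) =>
        boards.set ((0 + (k : Int)).toNat)
          ((boards.getD ((0 + (k : Int)).toNat) []) ++
            PySem.List.slice w (some (16 * (0 + (k : Int)))) (some (16 * (0 + (k : Int)) + 16))))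
      (List.replicate times.toNat []) =
      (List.range ((w.length + 15) / 16)).foldl (pvGStep w) (List.replicate times.toNat []) := by
    apply PySem.List.foldl_congr_mem
    intro boards k _
    exact hstep boards k
  rw [hfoldeq, ← pvMk2_zero times.toNat w, List.range_eq_range']
  have hwle : w.length ≤ 16 * times.toNat := by
    have hmax : ((times.toNat : Int)) = max times 0 := Int.toNat_eq_max times
    have : ((w.length : Int)) ≤ 16 * (times.toNat : Int) := by rw [hmax]; exact h
    exact_mod_cast this
  have hnc : (w.length + 15) / 16 ≤ times.toNat := by omega
  rw [pvAlt_chunk_fold times.toNat w _ 0 (by omega), Nat.zero_add,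
    pvMk2_full times.toNat w]

-- ===== VERDICT (by name: the statement is the Claim_ definition above) =====
theorem parse_spec : Claim_equal_parse := by
  intro text times _ hpre
  unfold Spec_parse
  set v := (text.toList.filter pvP).map (fun c => String.ofList [c]) with hv
  have hcnt : text.toList.countP pvP = v.length := by
    simp [hv, List.countP_eq_length_filter]
  unfold Pre_parse at hpre
  have hle : ((v.length : Int)) ≤ 16 * max times 0 := by
    rw [← hcnt]; exact_mod_cast hpre
  rw [pvParse_eq_fold, pvAlt_eq_mk text times hle]
  have hmax : ((times.toNat : Int)) = max times 0 := Int.toNat_eq_max times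
  have hle' : v.length ≤ 16 * times.toNat := by
    have : ((v.length : Int)) ≤ 16 * (times.toNat : Int) := by rw [hmax]; exact hle
    exact_mod_cast this
  have := pvFold_chunks times.toNat v [] (by simpa using hle')
  simp only [List.length_nil, Nat.zero_div, List.nil_append] at this
  rw [← pvMk_nil, this]
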